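-- pv_equiv track=rewrite | github.com/thatguyandy27/AdventOfCode2020 | Day16/getInvalidFields.py | cleanupPotentialMatches
-- ===== SOURCE A (Python) =====
-- def cleanupPotentialMatches(validFields, field, column, myTicket):
--     cleanup = [(field, column)]
--
--     while len(cleanup) > 0:
--         (field, c) = cleanup.pop()
--         for c2 in range(len(myTicket)):
--             if c2 != c and field in validFields[c2]:
--                 validFields[c2].remove(field)
--                 if len(validFields[c2]) == 1:
--                     validField = validFields[c2].pop()
--                     validFields[c2].add(validField)
--                     cleanup.append((validField, c2))
--
--     return validFields
-- ===== SOURCE B (Python) =====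
-- def cleanupPotentialMatches(validFields, field, column, myTicket):
--     # Recursive elimination: the call stack replaces A's explicit worklist.
--     # Mutates validFields in place, like the original.
--     def removeAndCheck(c2, f):
--         # drop f from column c2; report the sole remaining field if it became a singleton
--         validFields[c2].remove(f)
--         if len(validFields[c2]) == 1:
--             sole = validFields[c2].pop()
--             validFields[c2].add(sole)
--             return sole
--         return None
--
--     def eliminate(f, c):
--         triggered = []
--         for c2 in range(len(myTicket)):
--             if c2 != c and f in validFields[c2]:
--                 sole = removeAndCheck(c2, f)
--                 if sole is not None:
--                     triggered.append((sole, c2))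
--         for (f2, c2) in reversed(triggered):
--             eliminate(f2, c2)
--
--     eliminate(field, column)
--     return validFields
-- ===== Notes on version B (the rewrite author's own statement) =====
-- stated objective: alternative
-- what changed: The explicit worklist list ('cleanup' with append/pop) is replaced by recursion: a per-column helper removeAndCheck reports a newly-formed singleton and eliminate recurses on the triggered pairs newest-first, so the call stack carries the cascade in the same LIFO order and produces the identical final dict.
import Mathlib
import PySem

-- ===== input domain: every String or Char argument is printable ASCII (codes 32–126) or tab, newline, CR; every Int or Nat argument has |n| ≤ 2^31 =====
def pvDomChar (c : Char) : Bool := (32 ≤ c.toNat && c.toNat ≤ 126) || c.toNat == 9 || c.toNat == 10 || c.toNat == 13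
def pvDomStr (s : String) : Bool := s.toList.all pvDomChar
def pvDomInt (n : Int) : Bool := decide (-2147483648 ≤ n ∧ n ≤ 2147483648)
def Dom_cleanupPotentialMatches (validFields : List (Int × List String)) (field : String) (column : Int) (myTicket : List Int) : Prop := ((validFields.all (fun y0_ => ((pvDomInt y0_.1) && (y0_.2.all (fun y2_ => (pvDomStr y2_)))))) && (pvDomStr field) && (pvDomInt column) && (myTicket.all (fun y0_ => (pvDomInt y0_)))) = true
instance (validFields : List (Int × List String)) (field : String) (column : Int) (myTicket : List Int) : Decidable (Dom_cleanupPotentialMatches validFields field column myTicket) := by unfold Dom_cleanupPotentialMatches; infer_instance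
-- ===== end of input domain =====

-- B replaces A's explicit worklist ('cleanup') by recursion: a per-column helper reports a
-- newly-formed singleton, and the cascade is carried by the call stack (newest-first, i.e.
-- the same LIFO order as A's stack), so the final dict is identical.  Objective: alternative
-- decomposition, same cost.  Both Pythons mutate validFields in place; the equivalence proved
-- here is about the returned value (which is that same dict).

-- total number of field names stored across all columns; used only as a fuel bound
-- (both loops terminate because every cascade step removes at least one stored field)
def pvSize (d : PySem.Dict Int (List String)) : Nat :=
  (d.items.map (fun p => p.2.length)).sum

-- ===== PORT A =====
-- body of A's `for c2 in range(len(myTicket))` loop; second component is the cleanup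
-- stack (head = top, so `cleanup.append` prepends and `cleanup.pop()` takes the head)
def pvAStep (fld : String) (c : Int)
    (s : PySem.Dict Int (List String) × List (String × Int)) (c2 : Int) :
    PySem.Dict Int (List String) × List (String × Int) :=
  let cur := (s.1.get? c2).getD []                         -- validFields[c2] (Pre_ excludes the KeyError)
  if c2 ≠ c ∧ fld ∈ cur then
    let v1 := s.1.insert c2 (cur.erase fld)                -- validFields[c2].remove(field)
    let l2 := (v1.get? c2).getD []
    if l2.length == 1 then
      let x := l2.headD ""                                 -- validField = validFields[c2].pop()
      let v2 := v1.insert c2 (PySem.Set.add (l2.erase x) x) -- validFields[c2].add(validField)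
      (v2, (x, c2) :: s.2)                                 -- cleanup.append((validField, c2))
    else (v1, s.2)
  else s

-- the `while len(cleanup) > 0` loop; fuel is a totality guard only (see pvSize)
def pvALoop (n : Int) : Nat → List (String × Int) → PySem.Dict Int (List String) → PySem.Dict Int (List String)
  | 0, _, v => v
  | _ + 1, [], v => v
  | fuel + 1, (fld, c) :: rest, v =>
      let s := (PySem.List.pyRange 0 n 1).foldl (pvAStep fld c) (v, rest)
      pvALoop n fuel s.2 s.1

def cleanupPotentialMatches (validFields : List (Int × List String)) (field : String) (column : Int) (myTicket : List Int) : List (Int × List String) :=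
  (pvALoop (myTicket.length : Int) (2 * pvSize (PySem.Dict.mk validFields) + 3)
      [(field, column)] (PySem.Dict.mk validFields)).items

-- ===== PORT B =====
-- B's helper removeAndCheck(c2, f): drop f from column c2, report the sole survivor if any
def pvRemoveAndCheck (v : PySem.Dict Int (List String)) (c2 : Int) (f : String) :
    PySem.Dict Int (List String) × Option String :=
  let cur := (v.get? c2).getD []
  let v1 := v.insert c2 (cur.erase f)                      -- validFields[c2].remove(f)
  let l2 := (v1.get? c2).getD []
  if l2.length == 1 then
    let sole := l2.headD ""                                -- sole = validFields[c2].pop()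
    (v1.insert c2 (PySem.Set.add (l2.erase sole) sole), some sole)  -- validFields[c2].add(sole)
  else (v1, none)

-- column scan of B's `eliminate`: collects the `triggered` list in order
def pvBScan (fld : String) (c : Int)
    (s : PySem.Dict Int (List String) × List (String × Int)) (c2 : Int) :
    PySem.Dict Int (List String) × List (String × Int) :=
  if c2 ≠ c ∧ fld ∈ (s.1.get? c2).getD [] then
    match pvRemoveAndCheck s.1 c2 fld with
    | (v1, some sole) => (v1, s.2 ++ [(sole, c2)])         -- triggered.append((sole, c2))
    | (v1, none)      => (v1, s.2)
  else s

-- B's recursive `eliminate`; the recursion over `reversed(triggered)` replaces A's stack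
def pvEliminate (n : Int) : Nat → PySem.Dict Int (List String) → String → Int → PySem.Dict Int (List String)
  | 0, v, _, _ => v
  | fuel + 1, v, fld, c =>
      let s := (PySem.List.pyRange 0 n 1).foldl (pvBScan fld c) (v, [])
      s.2.reverse.foldl (fun w t => pvEliminate n fuel w t.1 t.2) s.1

def cleanupPotentialMatches_alt (validFields : List (Int × List String)) (field : String) (column : Int) (myTicket : List Int) : List (Int × List String) :=
  (pvEliminate (myTicket.length : Int) (pvSize (PySem.Dict.mk validFields) + 2)
      (PySem.Dict.mk validFields) field column).items

-- ===== PRECONDITION & SPEC =====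
-- Pre_ excludes (a) exactly the inputs on which Python A raises KeyError: some column index
-- 0..len(myTicket)-1 other than `column` is missing from the dict, or `column` itself is
-- missing AND the first scan triggers a cascade (some other in-range column holds `field`
-- among exactly 2 candidates) whose processing then looks `column` up; and (b) association
-- lists with duplicate keys, which no Python dict produces.
def Pre_cleanupPotentialMatches (validFields : List (Int × List String)) (field : String) (column : Int) (myTicket : List Int) : Prop :=
  (validFields.map Prod.fst).Nodup ∧
  (∀ i : Nat, i < myTicket.length → (i : Int) ≠ column → (i : Int) ∈ validFields.map Prod.fst) ∧
  ((0 ≤ column ∧ column < myTicket.length ∧ column ∉ validFields.map Prod.fst) →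
    ∀ p ∈ validFields, ¬(0 ≤ p.1 ∧ p.1 < myTicket.length ∧ p.1 ≠ column ∧ field ∈ p.2 ∧ p.2.length = 2))
instance (validFields : List (Int × List String)) (field : String) (column : Int) (myTicket : List Int) : Decidable (Pre_cleanupPotentialMatches validFields field column myTicket) := by unfold Pre_cleanupPotentialMatches; infer_instance

def pvWitness_cleanupPotentialMatches : (List (Int × List String)) × String × Int × List Int :=
  ([(0, ["a", "b"]), (1, ["a"])], "a", 0, [1, 2])

def Spec_cleanupPotentialMatches (validFields : List (Int × List String)) (field : String) (column : Int) (myTicket : List Int) (out : List (Int × List String)) : Prop := out = cleanupPotentialMatches_alt validFields field column myTicket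
instance (validFields : List (Int × List String)) (field : String) (column : Int) (myTicket : List Int) (out : List (Int × List String)) : Decidable (Spec_cleanupPotentialMatches validFields field column myTicket out) := by unfold Spec_cleanupPotentialMatches; infer_instance

-- ===== CLAIM (what is proved, stated in full; the proofs are below) =====
def Claim_equal_cleanupPotentialMatches : Prop := ∀ (validFields : List (Int × List String)) (field : String) (column : Int) (myTicket : List Int), Dom_cleanupPotentialMatches validFields field column myTicket → Pre_cleanupPotentialMatches validFields field column myTicket → Spec_cleanupPotentialMatches validFields field column myTicket (cleanupPotentialMatches validFields field column myTicket)

-- ===== LEMMAS AND PROOFS =====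

-- one column: A's inline body is B's helper, with the new item pushed instead of appended
theorem pvAStep_eq_pvBScan (fld : String) (c : Int)
    (s : PySem.Dict Int (List String) × List (String × Int)) (c2 : Int) :
    pvAStep fld c s c2
      = ((pvBScan fld c (s.1, []) c2).1, (pvBScan fld c (s.1, []) c2).2.reverse ++ s.2) := by
  obtain ⟨v, tr⟩ := s
  simp only [pvAStep, pvBScan, pvRemoveAndCheck]
  split_ifs with h1 h2 <;> simp

-- one column of B's scan only appends to the triggered list
theorem pvBScan_acc1 (fld : String) (c : Int)
    (s : PySem.Dict Int (List String) × List (String × Int)) (c2 : Int) :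
    pvBScan fld c s c2
      = ((pvBScan fld c (s.1, []) c2).1, s.2 ++ (pvBScan fld c (s.1, []) c2).2) := by
  obtain ⟨v, tr⟩ := s
  simp only [pvBScan, pvRemoveAndCheck]
  split_ifs with h1 h2 <;> simp

-- the whole scan only appends to the triggered list: the accumulator factors out
theorem pvBScan_acc (fld : String) (c : Int) (cols : List Int) :
    ∀ (s : PySem.Dict Int (List String) × List (String × Int)),
    cols.foldl (pvBScan fld c) s
      = ((cols.foldl (pvBScan fld c) (s.1, [])).1, s.2 ++ (cols.foldl (pvBScan fld c) (s.1, [])).2) := by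
  induction cols with
  | nil => intro s; simp
  | cons c2 cs ih =>
      intro s
      rw [List.foldl_cons, List.foldl_cons, ih (pvBScan fld c s c2),
          ih (pvBScan fld c (s.1, []) c2), pvBScan_acc1 fld c s c2]
      simp

-- A's column scan is B's column scan with the triggered list reversed onto the stack
theorem pvScan_rel (fld : String) (c : Int) (cols : List Int) :
    ∀ (s : PySem.Dict Int (List String) × List (String × Int)),
    cols.foldl (pvAStep fld c) s
      = ((cols.foldl (pvBScan fld c) (s.1, [])).1,
         (cols.foldl (pvBScan fld c) (s.1, [])).2.reverse ++ s.2) := by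
  induction cols with
  | nil => intro s; simp
  | cons c2 cs ih =>
      intro s
      rw [List.foldl_cons, List.foldl_cons, pvAStep_eq_pvBScan fld c s c2,
          ih ((pvBScan fld c (s.1, []) c2).1, (pvBScan fld c (s.1, []) c2).2.reverse ++ s.2),
          pvBScan_acc fld c cs (pvBScan fld c (s.1, []) c2)]
      simp

-- raw list form of the size bookkeeping for overwriting one existing key
theorem pvSizeList_insert : ∀ (it : List (Int × List String)) (k : Int) (l w : List String),
    (it.map (fun p => p.1)).Nodup →
    it.find? (fun p => p.1 == k) = some (k, l) →
    ((it.map (fun p => if p.1 == k then (k, w) else p)).map (fun p => p.2.length)).sum + l.length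
      = (it.map (fun p => p.2.length)).sum + w.length := by
  intro it
  induction it with
  | nil => intro k l w _ h; simp at h
  | cons a rest ih =>
      intro k l w hnd hf
      by_cases hk : a.1 = k
      · rw [List.find?_cons_of_pos (by simp [hk])] at hf
        have ha : a = (k, l) := by injection hf
        have hrest : rest.map (fun p => if p.1 == k then (k, w) else p) = rest := by
          have hnk : ∀ p ∈ rest, p.1 ≠ k := by
            intro p hp hpk
            have := hnd
            simp only [List.map_cons, List.nodup_cons] at this
            exact this.1 (hk ▸ hpk ▸ List.mem_map_of_mem hp)
          calc rest.map (fun p => if p.1 == k then (k, w) else p)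
              = rest.map id := List.map_congr_left (fun p hp => by simp [hnk p hp])
            _ = rest := List.map_id rest
        subst ha
        simp only [List.map_cons, List.sum_cons, hrest]
        simp only [show ((k, l).1 == k) = true by simp]
        simp only [if_true]
        omega
      · rw [List.find?_cons_of_neg (by simp [hk])] at hf
        have hnd' : (rest.map (fun p => p.1)).Nodup := by
          simp only [List.map_cons, List.nodup_cons] at hnd; exact hnd.2
        have := ih k l w hnd' hf
        simp only [List.map_cons, List.sum_cons]
        rw [if_neg (by simp [hk])]
        omega

-- size bookkeeping for one overwrite of an existing key (unique keys)
theorem pvSize_insert (d : PySem.Dict Int (List String)) (k : Int) (l w : List String)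
    (hnd : d.keys.Nodup) (hget : d.get? k = some l) :
    pvSize (d.insert k w) + l.length = pvSize d + w.length := by
  have hc : d.contains k = true := by
    rw [PySem.Dict.contains_eq_isSome_get?, hget]; rfl
  obtain ⟨pr, hfind, hsnd⟩ : ∃ pr, d.items.find? (fun p => p.1 == k) = some pr ∧ pr.2 = l := by
    have : Option.map (fun x => x.2) (d.items.find? (fun p => p.1 == k)) = some l := hget
    cases hf : d.items.find? (fun p => p.1 == k) with
    | none => rw [hf] at this; simp at this
    | some pr => rw [hf] at this; exact ⟨pr, rfl, by simpa using this⟩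
  have hk1 : pr.1 = k := by
    have := List.find?_some hfind
    simpa using this
  have hpr : pr = (k, l) := by
    obtain ⟨p1, p2⟩ := pr; simp_all
  rw [hpr] at hfind
  have hmain := pvSizeList_insert d.items k l w hnd hfind
  simp only [pvSize, PySem.Dict.insert, hc, if_true]
  exact hmain

theorem pvKeys_insert (d : PySem.Dict Int (List String)) (k : Int) (w : List String)
    (hget : (d.get? k).isSome) : (d.insert k w).keys = d.keys := by
  apply PySem.Dict.keys_insert_of_contains
  rw [PySem.Dict.contains_eq_isSome_get?, hget]

-- one column of B's scan: keys unchanged, and (stored fields) + (triggered) does not grow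
theorem pvBScan_keys (fld : String) (c : Int) (s : PySem.Dict Int (List String) × List (String × Int))
    (c2 : Int) : (pvBScan fld c s c2).1.keys = s.1.keys := by
  obtain ⟨v, tr⟩ := s
  simp only [pvBScan, pvRemoveAndCheck]
  cases hget : v.get? c2 with
  | none =>
      simp only [Option.getD_none]
      rw [if_neg (by simp)]
  | some cur =>
      simp only [Option.getD_some]
      have k1 : ((v.get? c2).isSome) = true := by rw [hget]; rfl
      split_ifs with hcond hlen <;> simp only []
      · rw [pvKeys_insert, pvKeys_insert]
        · exact k1
        · rw [PySem.Dict.get?_insert_self]; rfl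
      · rw [pvKeys_insert]
        exact k1

theorem pvBScan_size (fld : String) (c : Int) (s : PySem.Dict Int (List String) × List (String × Int))
    (c2 : Int) (hnd : s.1.keys.Nodup) :
    pvSize (pvBScan fld c s c2).1 + (pvBScan fld c s c2).2.length
      ≤ pvSize s.1 + s.2.length := by
  obtain ⟨v, tr⟩ := s
  simp only at hnd
  simp only [pvBScan, pvRemoveAndCheck]
  cases hget : v.get? c2 with
  | none =>
      simp only [Option.getD_none]
      rw [if_neg (by simp)]
  | some cur =>
      simp only [Option.getD_some, PySem.Dict.get?_insert_self]
      have k1 : ((v.get? c2).isSome) = true := by rw [hget]; rfl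
      split_ifs with hcond hlen <;> simp only []
      · obtain ⟨hc2, hmem⟩ := hcond
        have hklen : (cur.erase fld).length = cur.length - 1 := List.length_erase_of_mem hmem
        have hcl : 0 < cur.length := List.length_pos_of_mem hmem
        have h1 := pvSize_insert v c2 cur (cur.erase fld) hnd hget
        have hnd1 : (v.insert c2 (cur.erase fld)).keys.Nodup := by
          rw [pvKeys_insert _ _ _ k1]; exact hnd
        have hlen' : (cur.erase fld).length = 1 := by simpa using hlen
        obtain ⟨x, hx⟩ := List.length_eq_one_iff.mp hlen'
        have h2 := pvSize_insert (v.insert c2 (cur.erase fld)) c2 (cur.erase fld)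
          (PySem.Set.add ((cur.erase fld).erase ((cur.erase fld).headD "")) ((cur.erase fld).headD ""))
          hnd1 (PySem.Dict.get?_insert_self v c2 (cur.erase fld))
        have hval : (PySem.Set.add ((cur.erase fld).erase ((cur.erase fld).headD ""))
            ((cur.erase fld).headD "")).length = 1 := by
          rw [hx]; simp [PySem.Set.add]
        simp only [List.length_append, List.length_cons, List.length_nil]
        omega
      · have h1 := pvSize_insert v c2 cur (cur.erase fld) hnd hget
        have hklen : (cur.erase fld).length = cur.length - 1 :=
          List.length_erase_of_mem hcond.2
        have hcl : 0 < cur.length := List.length_pos_of_mem hcond.2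
        omega
      · simp

theorem pvScanFold_keys (fld : String) (c : Int) (cols : List Int) :
    ∀ (s : PySem.Dict Int (List String) × List (String × Int)),
    (cols.foldl (pvBScan fld c) s).1.keys = s.1.keys := by
  induction cols with
  | nil => intro s; rfl
  | cons c2 cs ih => intro s; rw [List.foldl_cons, ih, pvBScan_keys]

theorem pvScanFold_size (fld : String) (c : Int) (cols : List Int) :
    ∀ (s : PySem.Dict Int (List String) × List (String × Int)), s.1.keys.Nodup →
    pvSize (cols.foldl (pvBScan fld c) s).1 + (cols.foldl (pvBScan fld c) s).2.length
      ≤ pvSize s.1 + s.2.length := by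
  induction cols with
  | nil => intro s _; simp
  | cons c2 cs ih =>
      intro s hnd
      rw [List.foldl_cons]
      refine le_trans (ih _ ?_) (pvBScan_size fld c s c2 hnd)
      rw [pvBScan_keys]; exact hnd

-- the same scan facts with the initial pair written out
theorem pvScanFold_keys' (fld : String) (c : Int) (cols : List Int) (v : PySem.Dict Int (List String)) :
    (cols.foldl (pvBScan fld c) (v, [])).1.keys = v.keys :=
  pvScanFold_keys fld c cols (v, [])

theorem pvScanFold_size' (fld : String) (c : Int) (cols : List Int) (v : PySem.Dict Int (List String))
    (hnd : v.keys.Nodup) :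
    pvSize (cols.foldl (pvBScan fld c) (v, [])).1 + (cols.foldl (pvBScan fld c) (v, [])).2.length
      ≤ pvSize v := by
  have h := pvScanFold_size fld c cols (v, []) hnd
  simpa using h

theorem pvScan_rel' (fld : String) (c : Int) (cols : List Int) (v : PySem.Dict Int (List String))
    (st : List (String × Int)) :
    cols.foldl (pvAStep fld c) (v, st)
      = ((cols.foldl (pvBScan fld c) (v, [])).1, (cols.foldl (pvBScan fld c) (v, [])).2.reverse ++ st) :=
  pvScan_rel fld c cols (v, st)

-- pvEliminate never adds a field and never touches the key list
theorem pvEliminate_size (n : Int) (f : Nat) :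
    ∀ (v : PySem.Dict Int (List String)) (fld : String) (c : Int), v.keys.Nodup →
    pvSize (pvEliminate n f v fld c) ≤ pvSize v ∧ (pvEliminate n f v fld c).keys = v.keys := by
  induction f with
  | zero => intro v fld c _; exact ⟨le_refl _, rfl⟩
  | succ f ih =>
      intro v fld c hnd
      have fold : ∀ (T : List (String × Int)) (w : PySem.Dict Int (List String)), w.keys.Nodup →
          pvSize (T.foldl (fun w t => pvEliminate n f w t.1 t.2) w) ≤ pvSize w ∧
          (T.foldl (fun w t => pvEliminate n f w t.1 t.2) w).keys = w.keys := by
        intro T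
        induction T with
        | nil => intro w _; exact ⟨le_refl _, rfl⟩
        | cons t T ihT =>
            intro w hw
            obtain ⟨a1, a2⟩ := ih w t.1 t.2 hw
            obtain ⟨b1, b2⟩ := ihT (pvEliminate n f w t.1 t.2) (a2 ▸ hw)
            exact ⟨le_trans b1 a1, by rw [List.foldl_cons, b2, a2]⟩
      have hk := pvScanFold_keys' fld c (PySem.List.pyRange 0 n 1) v
      have hs := pvScanFold_size' fld c (PySem.List.pyRange 0 n 1) v hnd
      obtain ⟨c1, c2eq⟩ := fold ((PySem.List.pyRange 0 n 1).foldl (pvBScan fld c) (v, [])).2.reverse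
        ((PySem.List.pyRange 0 n 1).foldl (pvBScan fld c) (v, [])).1 (by rw [hk]; exact hnd)
      simp only [pvEliminate]
      constructor
      · refine le_trans c1 ?_
        omega
      · rw [c2eq, hk]

theorem pvElimFold_size (n : Int) (f : Nat) (T : List (String × Int)) :
    ∀ (w : PySem.Dict Int (List String)), w.keys.Nodup →
    pvSize (T.foldl (fun w t => pvEliminate n f w t.1 t.2) w) ≤ pvSize w ∧
    (T.foldl (fun w t => pvEliminate n f w t.1 t.2) w).keys = w.keys := by
  induction T with
  | nil => intro w _; exact ⟨le_refl _, rfl⟩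
  | cons t T ih =>
      intro w hnd
      obtain ⟨h1, h2⟩ := pvEliminate_size n f w t.1 t.2 hnd
      obtain ⟨h3, h4⟩ := ih (pvEliminate n f w t.1 t.2) (h2 ▸ hnd)
      exact ⟨le_trans h3 h1, by rw [List.foldl_cons, h4, h2]⟩

theorem pvALoop_nil (n : Int) (f : Nat) (v : PySem.Dict Int (List String)) :
    pvALoop n f [] v = v := by cases f <;> rfl

-- with enough fuel, A's loop does not depend on the exact fuel value
theorem pvALoop_stable (n : Int) (f : Nat) :
    ∀ (g : Nat) (stack : List (String × Int)) (v : PySem.Dict Int (List String)),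
    v.keys.Nodup → 2 * pvSize v + stack.length + 1 ≤ f → f ≤ g →
    pvALoop n f stack v = pvALoop n g stack v := by
  induction f with
  | zero => intro g stack v _ hf _; omega
  | succ f ih =>
      intro g stack v hnd hf hfg
      cases stack with
      | nil => rw [pvALoop_nil, pvALoop_nil]
      | cons t rest =>
          obtain ⟨fld, c⟩ := t
          obtain ⟨g', rfl⟩ : ∃ g', g = g' + 1 := ⟨g - 1, by omega⟩
          have hk := pvScanFold_keys' fld c (PySem.List.pyRange 0 n 1) v
          have hs := pvScanFold_size' fld c (PySem.List.pyRange 0 n 1) v hnd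
          simp only [pvALoop, pvScan_rel' fld c (PySem.List.pyRange 0 n 1) v rest]
          apply ih
          · exact hk.symm ▸ hnd
          · simp only [List.length_append, List.length_reverse, List.length_cons] at hf ⊢
            omega
          · omega

-- the simulation: running L off the top of A's stack is folding B's eliminate over L
theorem pvSim (n : Int) (bound : Nat) :
    ∀ (L stack : List (String × Int)) (v : PySem.Dict Int (List String)) (fA fB : Nat),
    v.keys.Nodup →
    pvSize v + L.length ≤ bound →
    2 * pvSize v + L.length + stack.length + 2 ≤ fA →
    bound + 1 ≤ fB →
    pvALoop n fA (L ++ stack) v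
      = pvALoop n fA stack (L.foldl (fun w t => pvEliminate n fB w t.1 t.2) v) := by
  induction bound using Nat.strong_induction_on with
  | _ bound IH =>
      intro L stack v fA fB hnd hb hfA hfB
      cases L with
      | nil => simp
      | cons t L' =>
          obtain ⟨f2, c2⟩ := t
          obtain ⟨fa, rfl⟩ : ∃ fa, fA = fa + 1 := ⟨fA - 1, by omega⟩
          obtain ⟨fb, rfl⟩ : ∃ fb, fB = fb + 1 := ⟨fB - 1, by omega⟩
          simp only [List.length_cons] at hb hfA
          have hk := pvScanFold_keys' f2 c2 (PySem.List.pyRange 0 n 1) v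
          have hs := pvScanFold_size' f2 c2 (PySem.List.pyRange 0 n 1) v hnd
          -- one iteration of A's while loop, then the two IH instances
          rw [List.cons_append]
          simp only [pvALoop, pvScan_rel' f2 c2 (PySem.List.pyRange 0 n 1) v (L' ++ stack)]
          rw [IH (bound - 1) (by omega)
                ((PySem.List.pyRange 0 n 1).foldl (pvBScan f2 c2) (v, [])).2.reverse (L' ++ stack)
                ((PySem.List.pyRange 0 n 1).foldl (pvBScan f2 c2) (v, [])).1 fa fb
                (hk ▸ hnd)
                (by simp only [List.length_reverse]; omega)
                (by simp only [List.length_reverse, List.length_append]; omega)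
                (by omega)]
          have hW := pvElimFold_size n fb
            ((PySem.List.pyRange 0 n 1).foldl (pvBScan f2 c2) (v, [])).2.reverse
            ((PySem.List.pyRange 0 n 1).foldl (pvBScan f2 c2) (v, [])).1 (hk ▸ hnd)
          rw [IH (bound - 1) (by omega) L' stack
                (((PySem.List.pyRange 0 n 1).foldl (pvBScan f2 c2) (v, [])).2.reverse.foldl
                  (fun w t => pvEliminate n fb w t.1 t.2)
                  ((PySem.List.pyRange 0 n 1).foldl (pvBScan f2 c2) (v, [])).1) fa (fb + 1)
                (hW.2 ▸ hk ▸ hnd)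
                (by have := hW.1; omega)
                (by have := hW.1; omega)
                (by omega)]
          have hX := pvElimFold_size n (fb + 1) L'
            (((PySem.List.pyRange 0 n 1).foldl (pvBScan f2 c2) (v, [])).2.reverse.foldl
              (fun w t => pvEliminate n fb w t.1 t.2)
              ((PySem.List.pyRange 0 n 1).foldl (pvBScan f2 c2) (v, [])).1)
            (hW.2 ▸ hk ▸ hnd)
          rw [List.foldl_cons,
              show pvEliminate n (fb + 1) v f2 c2
                = (((PySem.List.pyRange 0 n 1).foldl (pvBScan f2 c2) (v, [])).2.reverse.foldl
                    (fun w t => pvEliminate n fb w t.1 t.2)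
                    ((PySem.List.pyRange 0 n 1).foldl (pvBScan f2 c2) (v, [])).1) from rfl]
          exact pvALoop_stable n fa (fa + 1) stack _
            (hX.2 ▸ hW.2 ▸ hk ▸ hnd)
            (by have := hX.1; have := hW.1; omega)
            (by omega)

-- ===== VERDICT (by name: the statement is the Claim_ definition above) =====
theorem cleanupPotentialMatches_spec : Claim_equal_cleanupPotentialMatches := by
  intro validFields field column myTicket _ hpre
  unfold Spec_cleanupPotentialMatches cleanupPotentialMatches cleanupPotentialMatches_alt
  have hnd : (PySem.Dict.mk validFields).keys.Nodup := by
    simpa [PySem.Dict.keys] using hpre.1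
  have h := pvSim (myTicket.length : Int) (pvSize (PySem.Dict.mk validFields) + 1)
      [(field, column)] [] (PySem.Dict.mk validFields)
      (2 * pvSize (PySem.Dict.mk validFields) + 3) (pvSize (PySem.Dict.mk validFields) + 2)
      hnd (by simp) (by simp) (by omega)
  simp only [List.append_nil] at h
  rw [h, pvALoop_nil]
  rfl
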